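-- pv_equiv track=rewrite | github.com/mattboggess/tokn | model/re-pytorch-models/model/metric.py | get_word_pair_classifications
-- ===== SOURCE A (Python) =====
-- def get_word_pair_classifications(predictions, target, word_pairs, relations):
--
--     wp_classifications = {}
--     for relation in relations:
--         wp_classifications[relation] = {
--             "false_positives": [],
--             "true_positives": [],
--             "false_negatives": []
--         }
--
--     for pred, label, word_pair in zip(predictions, target, word_pairs):
--         if pred == label:
--             wp_classifications[relations[pred]]["true_positives"].append(word_pair)
--         else:
--             wp_classifications[relations[pred]]["false_positives"].append(word_pair)
--             wp_classifications[relations[label]]["false_negatives"].append(word_pair)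
--
--     return wp_classifications
-- ===== SOURCE B (Python) =====
-- def get_word_pair_classifications(predictions, target, word_pairs, relations):
--     triples = list(zip(predictions, target, word_pairs))
--     return {
--         rel: {
--             "false_positives": [wp for p, l, wp in triples if p != l and relations[p] == rel],
--             "true_positives": [wp for p, l, wp in triples if p == l and relations[p] == rel],
--             "false_negatives": [wp for p, l, wp in triples if p != l and relations[l] == rel],
--         }
--         for rel in relations
--     }
-- ===== Notes on version B (the rewrite author's own statement) =====
-- stated objective: alternative
-- what changed: Replaces the single fan-out pass that appends into a pre-initialised dict with a group-by-relation dict comprehension: each relation's three lists are built by filtering the zipped (pred,label,word_pair) stream directly.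
import Mathlib
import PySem

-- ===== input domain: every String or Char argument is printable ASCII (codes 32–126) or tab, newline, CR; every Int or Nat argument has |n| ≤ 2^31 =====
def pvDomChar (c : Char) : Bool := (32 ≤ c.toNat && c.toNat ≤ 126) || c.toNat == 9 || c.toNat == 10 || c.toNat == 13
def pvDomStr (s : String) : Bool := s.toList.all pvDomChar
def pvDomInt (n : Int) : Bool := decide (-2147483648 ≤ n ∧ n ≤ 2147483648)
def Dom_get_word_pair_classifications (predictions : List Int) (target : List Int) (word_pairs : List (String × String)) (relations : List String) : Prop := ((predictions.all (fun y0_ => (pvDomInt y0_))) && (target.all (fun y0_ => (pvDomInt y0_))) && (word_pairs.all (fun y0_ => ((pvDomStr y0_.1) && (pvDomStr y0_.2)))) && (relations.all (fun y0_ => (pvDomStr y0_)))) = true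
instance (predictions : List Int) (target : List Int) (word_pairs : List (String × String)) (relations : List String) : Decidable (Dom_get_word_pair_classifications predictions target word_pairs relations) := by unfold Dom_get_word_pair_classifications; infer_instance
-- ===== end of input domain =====

-- B replaces A's single fan-out pass over a pre-initialised dict with a group-by-relation
-- dict comprehension (three filters of the zipped stream per relation): alternative decomposition, not faster.


-- ===== PORT A =====
def get_word_pair_classifications (predictions : List Int) (target : List Int) (word_pairs : List (String × String)) (relations : List String) : List (String × List (String × List (String × String))) :=
  let init : PySem.Dict String (PySem.Dict String (List (String × String))) :=
    relations.foldl (fun d rel =>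
      d.insert rel (PySem.Dict.ofList
        [("false_positives", ([] : List (String × String))),
         ("true_positives", []),
         ("false_negatives", [])])) PySem.Dict.empty
  let final := (predictions.zip (target.zip word_pairs)).foldl (fun d t =>
    if t.1 == t.2.1 then
      d.modify (PySem.List.pyGetD relations t.1 "") PySem.Dict.empty
        (fun inner => inner.modify "true_positives" [] (fun l => l ++ [t.2.2]))
    else
      (d.modify (PySem.List.pyGetD relations t.1 "") PySem.Dict.empty
        (fun inner => inner.modify "false_positives" [] (fun l => l ++ [t.2.2]))).modify
        (PySem.List.pyGetD relations t.2.1 "") PySem.Dict.empty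
        (fun inner => inner.modify "false_negatives" [] (fun l => l ++ [t.2.2]))) init
  final.items.map (fun p => (p.1, p.2.items))

-- ===== PORT B =====
def get_word_pair_classifications_alt (predictions : List Int) (target : List Int) (word_pairs : List (String × String)) (relations : List String) : List (String × List (String × List (String × String))) :=
  let triples := predictions.zip (target.zip word_pairs)
  (relations.foldl (fun d rel =>
      d.insert rel (PySem.Dict.ofList
        [("false_positives",
          (triples.filter (fun t => !(t.1 == t.2.1) && (PySem.List.pyGetD relations t.1 "" == rel))).map (fun t => t.2.2)),
         ("true_positives",
          (triples.filter (fun t => (t.1 == t.2.1) && (PySem.List.pyGetD relations t.1 "" == rel))).map (fun t => t.2.2)),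
         ("false_negatives",
          (triples.filter (fun t => !(t.1 == t.2.1) && (PySem.List.pyGetD relations t.2.1 "" == rel))).map (fun t => t.2.2))]))
    PySem.Dict.empty).items.map (fun p => (p.1, p.2.items))

-- ===== PRECONDITION & SPEC =====
-- A raises IndexError when some zipped pred or label is out of range as an index into relations; Pre_ excludes exactly those.
def Pre_get_word_pair_classifications (predictions : List Int) (target : List Int) (word_pairs : List (String × String)) (relations : List String) : Prop :=
  ∀ t ∈ predictions.zip (target.zip word_pairs),
    PySem.Raise.InRange relations.length t.1 ∧ PySem.Raise.InRange relations.length t.2.1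
instance (predictions : List Int) (target : List Int) (word_pairs : List (String × String)) (relations : List String) : Decidable (Pre_get_word_pair_classifications predictions target word_pairs relations) := by unfold Pre_get_word_pair_classifications; infer_instance
def pvWitness_get_word_pair_classifications : List Int × List Int × (List (String × String)) × List String :=
  ([0, 1, 1], [0, 0, 1], [("a", "b"), ("c", "d"), ("e", "f")], ["rel1", "rel2"])
def Spec_get_word_pair_classifications (predictions : List Int) (target : List Int) (word_pairs : List (String × String)) (relations : List String) (out : List (String × List (String × List (String × String)))) : Prop := out = get_word_pair_classifications_alt predictions target word_pairs relations
instance (predictions : List Int) (target : List Int) (word_pairs : List (String × String)) (relations : List String) (out : List (String × List (String × List (String × String)))) : Decidable (Spec_get_word_pair_classifications predictions target word_pairs relations out) := by unfold Spec_get_word_pair_classifications; infer_instance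

-- ===== CLAIM (what is proved, stated in full; the proofs are below) =====
def Claim_equal_get_word_pair_classifications : Prop := ∀ (predictions : List Int) (target : List Int) (word_pairs : List (String × String)) (relations : List String), Dom_get_word_pair_classifications predictions target word_pairs relations → Pre_get_word_pair_classifications predictions target word_pairs relations → Spec_get_word_pair_classifications predictions target word_pairs relations (get_word_pair_classifications predictions target word_pairs relations)

-- ===== LEMMAS AND PROOFS =====

-- the three per-relation lists B builds (exactly B's filter/map bodies)
def pvFP (relations : List String) (ts : List (Int × Int × (String × String))) (rel : String) : List (String × String) :=
  (ts.filter (fun t => !(t.1 == t.2.1) && (PySem.List.pyGetD relations t.1 "" == rel))).map (fun t => t.2.2)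
def pvTP (relations : List String) (ts : List (Int × Int × (String × String))) (rel : String) : List (String × String) :=
  (ts.filter (fun t => (t.1 == t.2.1) && (PySem.List.pyGetD relations t.1 "" == rel))).map (fun t => t.2.2)
def pvFN (relations : List String) (ts : List (Int × Int × (String × String))) (rel : String) : List (String × String) :=
  (ts.filter (fun t => !(t.1 == t.2.1) && (PySem.List.pyGetD relations t.2.1 "" == rel))).map (fun t => t.2.2)

def pvMk (F T N : List (String × String)) : PySem.Dict String (List (String × String)) :=
  PySem.Dict.mk [("false_positives", F), ("true_positives", T), ("false_negatives", N)]

-- inner-dict updates A performs, on the 3-key shape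
theorem pvMk_modify_tp (F T N : List (String × String)) (w : String × String) :
    (pvMk F T N).modify "true_positives" [] (fun l => l ++ [w]) = pvMk F (T ++ [w]) N := by
  simp [pvMk, PySem.Dict.modify, PySem.Dict.insert, PySem.Dict.getD, PySem.Dict.get?, PySem.Dict.contains]
theorem pvMk_modify_fp (F T N : List (String × String)) (w : String × String) :
    (pvMk F T N).modify "false_positives" [] (fun l => l ++ [w]) = pvMk (F ++ [w]) T N := by
  simp [pvMk, PySem.Dict.modify, PySem.Dict.insert, PySem.Dict.getD, PySem.Dict.get?, PySem.Dict.contains]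
theorem pvMk_modify_fn (F T N : List (String × String)) (w : String × String) :
    (pvMk F T N).modify "false_negatives" [] (fun l => l ++ [w]) = pvMk F T (N ++ [w]) := by
  simp [pvMk, PySem.Dict.modify, PySem.Dict.insert, PySem.Dict.getD, PySem.Dict.get?, PySem.Dict.contains]

-- a foldl of key-determined inserts over a shaped dict stays shaped
theorem pv_foldl_insert_items (Vf : String → PySem.Dict String (List (String × String))) :
    ∀ (l M : List String) (d : PySem.Dict String (PySem.Dict String (List (String × String)))),
      M.Nodup → d.items = M.map (fun k => (k, Vf k)) →
      (l.foldl (fun d k => d.insert k (Vf k)) d).items = (PySem.Set.update M l).map (fun k => (k, Vf k)) := by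
  intro l
  induction l with
  | nil => intro M d _ hd; simpa [PySem.Set.update] using hd
  | cons k l ih =>
    intro M d hM hd
    have hkeys : d.keys = M := by
      simp [PySem.Dict.keys, hd, List.map_map, Function.comp_def]
    by_cases hk : k ∈ M
    · have hc : d.contains k = true := by
        rw [PySem.Dict.contains_iff_mem_keys, hkeys]; exact hk
      have hins : (d.insert k (Vf k)).items = M.map (fun k' => (k', Vf k')) := by
        rw [PySem.Dict.items_insert_of_contains _ _ hc, hd, List.map_map]
        refine List.map_congr_left ?_
        intro x _
        by_cases hx : x = k
        · subst hx; simp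
        · simp [Function.comp, beq_iff_eq, hx]
      have := ih M (d.insert k (Vf k)) hM hins
      simpa [PySem.Set.update_cons, PySem.Set.add_of_mem hk] using this
    · have hc : d.contains k = false := by
        rw [Bool.eq_false_iff]
        intro hcon
        exact hk (by rw [← hkeys]; exact (PySem.Dict.contains_iff_mem_keys _ _).mp hcon)
      have hins : (d.insert k (Vf k)).items = (M ++ [k]).map (fun k' => (k', Vf k')) := by
        rw [PySem.Dict.items_insert_of_not_contains _ _ hc, hd]; simp
      have hM' : (M ++ [k]).Nodup := by
        simp only [List.nodup_append]
        exact ⟨hM, List.nodup_singleton k, by intro a ha b hb; simp at hb; subst hb; exact fun h => hk (h ▸ ha)⟩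
      have := ih (M ++ [k]) (d.insert k (Vf k)) hM' hins
      simpa [PySem.Set.update_cons, PySem.Set.add_of_not_mem hk] using this

-- an outer modify at a key of a shaped dict updates exactly that entry
theorem pv_modify_items (k : String) (dflt : PySem.Dict String (List (String × String)))
    (f : PySem.Dict String (List (String × String)) → PySem.Dict String (List (String × String)))
    (M : List String) (Vf : String → PySem.Dict String (List (String × String)))
    (d : PySem.Dict String (PySem.Dict String (List (String × String))))
    (hM : M.Nodup) (hk : k ∈ M) (hd : d.items = M.map (fun r => (r, Vf r))) :
    (d.modify k dflt f).items = M.map (fun r => (r, if r = k then f (Vf k) else Vf r)) := by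
  have hkeys : d.keys = M := by
    simp [PySem.Dict.keys, hd, List.map_map, Function.comp_def]
  have hnd : d.keys.Nodup := by rw [hkeys]; exact hM
  have hmem : (k, Vf k) ∈ d.items := by
    rw [hd]; exact List.mem_map.mpr ⟨k, hk, rfl⟩
  have hget : d.getD k dflt = Vf k := PySem.Dict.getD_of_mem_items d hmem hnd dflt
  have hmod : d.modify k dflt f = d.insert k (f (d.getD k dflt)) := rfl
  have hc : d.contains k = true := by
    rw [PySem.Dict.contains_iff_mem_keys, hkeys]; exact hk
  rw [hmod, hget, PySem.Dict.items_insert_of_contains _ _ hc, hd, List.map_map]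
  refine List.map_congr_left ?_
  intro x _
  by_cases hx : x = k
  · subst hx; simp
  · simp [Function.comp, beq_iff_eq, hx]

-- A's classification loop over a shaped dict produces exactly B's per-relation lists
theorem pv_loop (relations : List String) :
    ∀ (ts : List (Int × Int × (String × String))) (M : List String)
      (F T N : String → List (String × String))
      (d : PySem.Dict String (PySem.Dict String (List (String × String)))),
      M.Nodup →
      (∀ t ∈ ts, PySem.List.pyGetD relations t.1 "" ∈ M ∧ PySem.List.pyGetD relations t.2.1 "" ∈ M) →
      d.items = M.map (fun r => (r, pvMk (F r) (T r) (N r))) →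
      (ts.foldl (fun d t =>
        if t.1 == t.2.1 then
          d.modify (PySem.List.pyGetD relations t.1 "") PySem.Dict.empty
            (fun inner => inner.modify "true_positives" [] (fun l => l ++ [t.2.2]))
        else
          (d.modify (PySem.List.pyGetD relations t.1 "") PySem.Dict.empty
            (fun inner => inner.modify "false_positives" [] (fun l => l ++ [t.2.2]))).modify
            (PySem.List.pyGetD relations t.2.1 "") PySem.Dict.empty
            (fun inner => inner.modify "false_negatives" [] (fun l => l ++ [t.2.2]))) d).items
      = M.map (fun r => (r, pvMk (F r ++ pvFP relations ts r) (T r ++ pvTP relations ts r) (N r ++ pvFN relations ts r))) := by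
  intro ts
  induction ts with
  | nil =>
    intro M F T N d _ _ hd
    simpa [pvFP, pvTP, pvFN] using hd
  | cons t ts ih =>
    intro M F T N d hM hmem hd
    have h1 : PySem.List.pyGetD relations t.1 "" ∈ M := (hmem t (List.mem_cons_self)).1
    have h2 : PySem.List.pyGetD relations t.2.1 "" ∈ M := (hmem t (List.mem_cons_self)).2
    have hmem' : ∀ u ∈ ts, PySem.List.pyGetD relations u.1 "" ∈ M ∧ PySem.List.pyGetD relations u.2.1 "" ∈ M :=
      fun u hu => hmem u (List.mem_cons_of_mem _ hu)
    by_cases hpl : t.1 = t.2.1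
    · -- true positive step
      have hstep : ((if t.1 == t.2.1 then
          d.modify (PySem.List.pyGetD relations t.1 "") PySem.Dict.empty
            (fun inner => inner.modify "true_positives" [] (fun l => l ++ [t.2.2]))
        else
          (d.modify (PySem.List.pyGetD relations t.1 "") PySem.Dict.empty
            (fun inner => inner.modify "false_positives" [] (fun l => l ++ [t.2.2]))).modify
            (PySem.List.pyGetD relations t.2.1 "") PySem.Dict.empty
            (fun inner => inner.modify "false_negatives" [] (fun l => l ++ [t.2.2])))).items
          = M.map (fun r => (r, pvMk (F r)
              ((fun r => if r = PySem.List.pyGetD relations t.1 "" then T r ++ [t.2.2] else T r) r) (N r))) := by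
        rw [if_pos (by simpa using hpl)]
        rw [pv_modify_items _ _ _ M (fun r => pvMk (F r) (T r) (N r)) d hM h1 hd]
        refine List.map_congr_left ?_
        intro x _
        by_cases hx : x = PySem.List.pyGetD relations t.1 ""
        · subst hx; simp [pvMk_modify_tp]
        · simp [hx]
      rw [List.foldl_cons, ih M F _ N _ hM hmem' hstep]
      refine List.map_congr_left ?_
      intro x _
      have hfp : pvFP relations (t :: ts) x = pvFP relations ts x := by
        simp [pvFP, List.filter_cons, hpl]
      have hfn : pvFN relations (t :: ts) x = pvFN relations ts x := by
        simp [pvFN, List.filter_cons, hpl]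
      by_cases hx : x = PySem.List.pyGetD relations t.1 ""
      · have htp : pvTP relations (t :: ts) x = t.2.2 :: pvTP relations ts x := by
          have hx2 : PySem.List.pyGetD relations t.2.1 "" = x := by rw [← hpl, ← hx]
          simp [pvTP, List.filter_cons, hpl, hx2]
        simp [hx.symm, htp, hfp, hfn, pvMk]
      · have htp : pvTP relations (t :: ts) x = pvTP relations ts x := by
          have hx2 : ¬ (PySem.List.pyGetD relations t.2.1 "" = x) := fun h => hx (by rw [← h, hpl])
          simp [pvTP, List.filter_cons, hpl, hx2]
        simp [hx, htp, hfp, hfn]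
    · -- false positive / false negative step
      have hne : (t.1 == t.2.1) = false := by simp [hpl]
      have hstep1 := pv_modify_items (PySem.List.pyGetD relations t.1 "") PySem.Dict.empty
        (fun inner => inner.modify "false_positives" [] (fun l => l ++ [t.2.2]))
        M (fun r => pvMk (F r) (T r) (N r)) d hM h1 hd
      have hstep1' : (d.modify (PySem.List.pyGetD relations t.1 "") PySem.Dict.empty
            (fun inner => inner.modify "false_positives" [] (fun l => l ++ [t.2.2]))).items
          = M.map (fun r => (r, pvMk
              ((fun r => if r = PySem.List.pyGetD relations t.1 "" then F r ++ [t.2.2] else F r) r) (T r) (N r))) := by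
        rw [hstep1]
        refine List.map_congr_left ?_
        intro x _
        by_cases hx : x = PySem.List.pyGetD relations t.1 ""
        · subst hx; simp [pvMk_modify_fp]
        · simp [hx]
      have hstep2 := pv_modify_items (PySem.List.pyGetD relations t.2.1 "") PySem.Dict.empty
        (fun inner => inner.modify "false_negatives" [] (fun l => l ++ [t.2.2]))
        M (fun r => pvMk ((fun r => if r = PySem.List.pyGetD relations t.1 "" then F r ++ [t.2.2] else F r) r) (T r) (N r))
        _ hM h2 hstep1'
      have hstep2' : ((d.modify (PySem.List.pyGetD relations t.1 "") PySem.Dict.empty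
            (fun inner => inner.modify "false_positives" [] (fun l => l ++ [t.2.2]))).modify
            (PySem.List.pyGetD relations t.2.1 "") PySem.Dict.empty
            (fun inner => inner.modify "false_negatives" [] (fun l => l ++ [t.2.2]))).items
          = M.map (fun r => (r, pvMk
              ((fun r => if r = PySem.List.pyGetD relations t.1 "" then F r ++ [t.2.2] else F r) r) (T r)
              ((fun r => if r = PySem.List.pyGetD relations t.2.1 "" then N r ++ [t.2.2] else N r) r))) := by
        rw [hstep2]
        refine List.map_congr_left ?_
        intro x _
        by_cases hx : x = PySem.List.pyGetD relations t.2.1 ""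
        · subst hx; simp [pvMk_modify_fn]
        · simp [hx]
      rw [List.foldl_cons, if_neg (by simp [hpl])]
      rw [ih M _ T _ _ hM hmem' hstep2']
      refine List.map_congr_left ?_
      intro x _
      have htp : pvTP relations (t :: ts) x = pvTP relations ts x := by
        simp [pvTP, List.filter_cons, hne]
      by_cases hx1 : x = PySem.List.pyGetD relations t.1 ""
      · have hfp : pvFP relations (t :: ts) x = t.2.2 :: pvFP relations ts x := by
          simp [pvFP, List.filter_cons, hne, hx1.symm]
        by_cases hx2 : x = PySem.List.pyGetD relations t.2.1 ""
        · have hfn : pvFN relations (t :: ts) x = t.2.2 :: pvFN relations ts x := by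
            simp [pvFN, List.filter_cons, hne, hx2.symm]
          simp [hx1.symm, hx2.symm, hfp, hfn, htp, pvMk]
        · have hfn : pvFN relations (t :: ts) x = pvFN relations ts x := by
            have : (PySem.List.pyGetD relations t.2.1 "" == x) = false := by
              simp [beq_iff_eq]; exact fun h => hx2 h.symm
            simp [pvFN, List.filter_cons, hne, this]
          simp [hx1.symm, hx2, hfp, hfn, htp, pvMk]
      · have hfp : pvFP relations (t :: ts) x = pvFP relations ts x := by
          have : (PySem.List.pyGetD relations t.1 "" == x) = false := by
            simp [beq_iff_eq]; exact fun h => hx1 h.symm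
          simp [pvFP, List.filter_cons, hne, this]
        by_cases hx2 : x = PySem.List.pyGetD relations t.2.1 ""
        · have hfn : pvFN relations (t :: ts) x = t.2.2 :: pvFN relations ts x := by
            simp [pvFN, List.filter_cons, hne, hx2.symm]
          simp [hx1, hx2.symm, hfp, hfn, htp, pvMk]
        · have hfn : pvFN relations (t :: ts) x = pvFN relations ts x := by
            have : (PySem.List.pyGetD relations t.2.1 "" == x) = false := by
              simp [beq_iff_eq]; exact fun h => hx2 h.symm
            simp [pvFN, List.filter_cons, hne, this]
          simp [hx1, hx2, hfp, hfn, htp]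

-- ===== VERDICT (by name: the statement is the Claim_ definition above) =====
theorem get_word_pair_classifications_spec : Claim_equal_get_word_pair_classifications := by
  intro predictions target word_pairs relations _ hpre
  unfold Spec_get_word_pair_classifications
  unfold get_word_pair_classifications get_word_pair_classifications_alt
  dsimp only
  set ts := predictions.zip (target.zip word_pairs) with hts
  set M := PySem.Set.update ([] : List String) relations with hMdef
  have hM : M.Nodup := by
    rw [hMdef, PySem.Set.update_nil_left]; exact PySem.Set.nodup_ofList relations
  have hmem : ∀ t ∈ ts, PySem.List.pyGetD relations t.1 "" ∈ M ∧
      PySem.List.pyGetD relations t.2.1 "" ∈ M := by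
    intro t htm
    obtain ⟨hr1, hr2⟩ := hpre t htm
    rw [hMdef, PySem.Set.update_nil_left]
    exact ⟨(PySem.Set.mem_ofList _ _).mpr (PySem.List.pyGetD_mem _ _ hr1),
           (PySem.Set.mem_ofList _ _).mpr (PySem.List.pyGetD_mem _ _ hr2)⟩
  have hinit := pv_foldl_insert_items
    (fun _ => PySem.Dict.ofList
      [("false_positives", ([] : List (String × String))),
       ("true_positives", []),
       ("false_negatives", [])])
    relations [] PySem.Dict.empty List.nodup_nil (by simp [PySem.Dict.empty])
  have hloop := pv_loop relations ts M (fun _ => []) (fun _ => []) (fun _ => []) _ hM hmem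
    (show _ = M.map (fun r => (r, pvMk [] [] [])) from hinit)
  rw [hloop]
  have hB := pv_foldl_insert_items
    (fun rel => PySem.Dict.ofList
      [("false_positives",
        (ts.filter (fun t => !(t.1 == t.2.1) && (PySem.List.pyGetD relations t.1 "" == rel))).map (fun t => t.2.2)),
       ("true_positives",
        (ts.filter (fun t => (t.1 == t.2.1) && (PySem.List.pyGetD relations t.1 "" == rel))).map (fun t => t.2.2)),
       ("false_negatives",
        (ts.filter (fun t => !(t.1 == t.2.1) && (PySem.List.pyGetD relations t.2.1 "" == rel))).map (fun t => t.2.2))])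
    relations [] PySem.Dict.empty List.nodup_nil (by simp [PySem.Dict.empty])
  rw [hB, List.map_map, List.map_map]
  refine List.map_congr_left ?_
  intro x _
  rfl
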